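-- pv_equiv track=rewrite | github.com/OpenBlatam/IA-Models-Clone | heygen_ai/advanced_optimization_system.py | _recommend_strategies
-- ===== SOURCE A (Python) =====
-- from typing import Dict, Any, List, Optional, Tuple, Union
--
-- def _recommend_strategies(opportunities: List[str]) -> List[str]:
--     """Recommend optimization strategies based on opportunities."""
--     recommendations = []
--
--     for opportunity in opportunities:
--         if opportunity == "memory_optimization":
--             recommendations.append("memory_optimization_v1")
--         elif opportunity == "cpu_optimization":
--             recommendations.append("cpu_optimization_v1")
--         elif opportunity == "gpu_optimization":
--             recommendations.append("gpu_optimization_v1")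
--         elif opportunity == "network_optimization":
--             recommendations.append("network_optimization_v1")
--         elif opportunity == "performance_optimization":
--             recommendations.extend(["memory_optimization_v1", "cpu_optimization_v1"])
--
--     return recommendations
-- ===== SOURCE B (Python) =====
-- _BASE_OPPS = ("memory_optimization", "cpu_optimization",
--               "gpu_optimization", "network_optimization")
--
-- def _recommend_strategies(opportunities):
--     """Recommend optimization strategies based on opportunities."""
--     # Stage 1: rewrite the composite opportunity into its two base opportunities.
--     expanded = []
--     for opp in opportunities:
--         if opp == "performance_optimization":
--             expanded += ["memory_optimization", "cpu_optimization"]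
--         else:
--             expanded.append(opp)
--     # Stage 2: keep known base opportunities; Stage 3: each recommendation is the
--     # opportunity name suffixed with "_v1".
--     return [opp + "_v1" for opp in expanded if opp in _BASE_OPPS]
-- ===== Notes on version B (the rewrite author's own statement) =====
-- stated objective: alternative
-- what changed: Replaced the single-pass if/elif cascade with a staged pipeline: expand the composite 'performance_optimization' into its two base opportunities, filter to the known base opportunities, and compute each recommendation by string concatenation (name + '_v1') instead of hard-coded result strings.
import Mathlib
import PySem

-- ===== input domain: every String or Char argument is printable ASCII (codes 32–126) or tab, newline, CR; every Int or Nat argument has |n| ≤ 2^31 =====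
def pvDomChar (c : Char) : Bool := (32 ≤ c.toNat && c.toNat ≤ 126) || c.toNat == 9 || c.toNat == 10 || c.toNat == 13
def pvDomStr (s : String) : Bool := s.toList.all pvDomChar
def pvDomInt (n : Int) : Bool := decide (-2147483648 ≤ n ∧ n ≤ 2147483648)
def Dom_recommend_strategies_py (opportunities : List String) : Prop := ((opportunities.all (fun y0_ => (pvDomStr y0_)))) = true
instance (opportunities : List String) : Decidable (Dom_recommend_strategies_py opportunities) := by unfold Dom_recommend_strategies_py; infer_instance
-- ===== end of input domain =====

-- B replaces A's if/elif cascade with a staged pipeline: expand the composite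
-- opportunity, filter to the known base opportunities, suffix "_v1" (alternative).

-- ===== PORT A =====
def recommend_strategies_py (opportunities : List String) : List String :=
  opportunities.foldl (fun recommendations opportunity =>
    if opportunity == "memory_optimization" then recommendations ++ ["memory_optimization_v1"]
    else if opportunity == "cpu_optimization" then recommendations ++ ["cpu_optimization_v1"]
    else if opportunity == "gpu_optimization" then recommendations ++ ["gpu_optimization_v1"]
    else if opportunity == "network_optimization" then recommendations ++ ["network_optimization_v1"]
    else if opportunity == "performance_optimization" then recommendations ++ ["memory_optimization_v1", "cpu_optimization_v1"]
    else recommendations) []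

-- ===== PORT B =====
def baseOpps : List String :=
  ["memory_optimization", "cpu_optimization", "gpu_optimization", "network_optimization"]

def recommend_strategies_py_alt (opportunities : List String) : List String :=
  let expanded := opportunities.foldl (fun e opp =>
    if opp == "performance_optimization" then e ++ ["memory_optimization", "cpu_optimization"]
    else e ++ [opp]) []
  (expanded.filter (fun opp => baseOpps.contains opp)).map (fun opp => opp ++ "_v1")

-- ===== PRECONDITION & SPEC =====
def Spec_recommend_strategies_py (opportunities : List String) (out : List String) : Prop := out = recommend_strategies_py_alt opportunities
instance (opportunities : List String) (out : List String) : Decidable (Spec_recommend_strategies_py opportunities out) := by unfold Spec_recommend_strategies_py; infer_instance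

-- ===== CLAIM (what is proved, stated in full; the proofs are below) =====
def Claim_equal_recommend_strategies_py : Prop := ∀ (opportunities : List String), Dom_recommend_strategies_py opportunities → Spec_recommend_strategies_py opportunities (recommend_strategies_py opportunities)

-- ===== LEMMAS AND PROOFS =====

-- per-element expansion of B's first stage
def expand1 (opp : String) : List String :=
  if opp == "performance_optimization" then ["memory_optimization", "cpu_optimization"]
  else [opp]

-- B's first-stage fold builds the flatMap of expand1.
theorem expand_fold_eq (opportunities acc : List String) :
    opportunities.foldl (fun e opp =>
      if opp == "performance_optimization" then e ++ ["memory_optimization", "cpu_optimization"]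
      else e ++ [opp]) acc = acc ++ opportunities.flatMap expand1 := by
  induction opportunities generalizing acc with
  | nil => simp
  | cons x xs ih =>
    rw [List.foldl_cons, List.flatMap_cons]
    by_cases h : x == "performance_optimization"
    · rw [if_pos h, ih]; simp [expand1, h]
    · rw [if_neg h, ih]; simp [expand1, h]

-- per-element result of B's whole pipeline
def g (opp : String) : List String :=
  ((expand1 opp).filter (fun o => baseOpps.contains o)).map (fun o => o ++ "_v1")

-- A's fold step appends exactly g of the element.
theorem step_eq_g (acc : List String) (opp : String) :
    (if opp == "memory_optimization" then acc ++ ["memory_optimization_v1"]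
     else if opp == "cpu_optimization" then acc ++ ["cpu_optimization_v1"]
     else if opp == "gpu_optimization" then acc ++ ["gpu_optimization_v1"]
     else if opp == "network_optimization" then acc ++ ["network_optimization_v1"]
     else if opp == "performance_optimization" then acc ++ ["memory_optimization_v1", "cpu_optimization_v1"]
     else acc) = acc ++ g opp := by
  split_ifs with h1 h2 h3 h4 h5
  · cases eq_of_beq h1; rfl
  · cases eq_of_beq h2; rfl
  · cases eq_of_beq h3; rfl
  · cases eq_of_beq h4; rfl
  · cases eq_of_beq h5; rfl
  · have t : g opp = [] := by
      simp only [beq_iff_eq] at h1 h2 h3 h4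
      simp [g, expand1, h5, baseOpps, h1, h2, h3, h4]
    simp [t]

theorem foldA_eq (opportunities acc : List String) :
    opportunities.foldl (fun recommendations opportunity =>
      if opportunity == "memory_optimization" then recommendations ++ ["memory_optimization_v1"]
      else if opportunity == "cpu_optimization" then recommendations ++ ["cpu_optimization_v1"]
      else if opportunity == "gpu_optimization" then recommendations ++ ["gpu_optimization_v1"]
      else if opportunity == "network_optimization" then recommendations ++ ["network_optimization_v1"]
      else if opportunity == "performance_optimization" then recommendations ++ ["memory_optimization_v1", "cpu_optimization_v1"]
      else recommendations) acc = acc ++ opportunities.flatMap g := by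
  induction opportunities generalizing acc with
  | nil => simp
  | cons x xs ih => rw [List.foldl_cons, step_eq_g, ih, List.flatMap_cons, List.append_assoc]

-- B's stages fused: filtering and mapping distribute over the expansion.
theorem flatMap_g_eq (l : List String) :
    l.flatMap g
      = ((l.flatMap expand1).filter (fun o => baseOpps.contains o)).map (fun o => o ++ "_v1") := by
  induction l with
  | nil => rfl
  | cons x xs ih => simp [List.flatMap_cons, List.filter_append, List.map_append, ih, g]

-- ===== VERDICT (by name: the statement is the Claim_ definition above) =====
theorem recommend_strategies_py_spec : Claim_equal_recommend_strategies_py := by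
  intro opportunities _
  unfold Spec_recommend_strategies_py recommend_strategies_py recommend_strategies_py_alt
  rw [foldA_eq, expand_fold_eq]
  simp only [List.nil_append]
  exact flatMap_g_eq opportunities
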